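-- pv_equiv track=rewrite | github.com/bbyk/cwo | python/bbyk/hackerrank/clique.py | min_max_clique
-- ===== SOURCE A (Python) =====
-- def e_for_complete(n):
--     return (n * (n - 1)) >> 1
--
-- def edges_at_most(r, n):
--     '''
--     https://en.wikipedia.org/wiki/Tur%C3%A1n%27s_theorem
--     https://ru.wikipedia.org/wiki/%D0%A2%D0%B5%D0%BE%D1%80%D0%B5%D0%BC%D0%B0_%D0%A2%D1%83%D1%80%D0%B0%D0%BD%D0%B0
--     if there is a clique of size r in n-vertex graph this is
--     how many edges at most the graph can have.
--     '''
--     m = n // r  # size of a partition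
--     k = n % r  # partitions with m+1 size
--     rk = r - k  # partitions of m size
--
--     # edges between two groups of m+1 size is (m + 1) * (m + 1)
--     # for k groups:
--     res = e_for_complete(k) * (m + 1) * (m + 1)
--
--     # edges between two groups of m size is m * m
--     # for rk groups:
--     res += e_for_complete(rk) * m * m
--
--     # edges between two big groups
--     res += k * (m + 1) * rk * m
--
--     return res
--
-- def min_max_clique(N, M):
--     l = 2
--     r = N
--     while l < r:
--         m = l + ((r - l) >> 1)
--         n_edges = edges_at_most(m, N)
--         if n_edges == M:
--             return m
--         if n_edges > M:
--             r = m
--         else: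
--             l = m + 1
--     return r
-- ===== SOURCE B (Python) =====
-- # B: instead of binary search, jump over blocks of r sharing the same quotient m = N // r
-- # (the standard O(sqrt N) divisor-block technique) and solve each block by arithmetic.
-- def e_for_complete(n):
--     return (n * (n - 1)) >> 1
--
-- def edges_at_most(r, n):
--     m = n // r
--     k = n % r
--     rk = r - k
--     res = e_for_complete(k) * (m + 1) * (m + 1)
--     res += e_for_complete(rk) * m * m
--     res += k * (m + 1) * rk * m
--     return res
--
-- def min_max_clique(N, M):
--     # smallest r in [2, N-1] whose Turan bound edges_at_most(r, N) reaches M, else N;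
--     # edges_at_most(r, N) >= M  <=>  G(r) := m*(2N - r*(m+1)) <= T  with m = N // r.
--     T = N * (N - 1) - 2 * M
--     r = 2
--     while r <= N - 1:
--         m = N // r
--         r2 = min(N // m, N - 1)
--         # on [r, r2] the quotient is constantly m, so G(r') <= T <=> r' >= cand
--         cand = -((T - 2 * N * m) // (m * (m + 1)))
--         if cand <= r2:
--             return r if cand <= r else cand
--         r = r2 + 1
--     return N
-- ===== Notes on version B (the rewrite author's own statement) =====
-- stated objective: alternative
-- what changed: Replaced A's binary search over the Turan bound by the divisor-block technique: B jumps over maximal blocks of r sharing the quotient m = N // r and decides each whole block with one ceiling division, instead of repeatedly evaluating edges_at_most at binary-search midpoints.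
import Mathlib
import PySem

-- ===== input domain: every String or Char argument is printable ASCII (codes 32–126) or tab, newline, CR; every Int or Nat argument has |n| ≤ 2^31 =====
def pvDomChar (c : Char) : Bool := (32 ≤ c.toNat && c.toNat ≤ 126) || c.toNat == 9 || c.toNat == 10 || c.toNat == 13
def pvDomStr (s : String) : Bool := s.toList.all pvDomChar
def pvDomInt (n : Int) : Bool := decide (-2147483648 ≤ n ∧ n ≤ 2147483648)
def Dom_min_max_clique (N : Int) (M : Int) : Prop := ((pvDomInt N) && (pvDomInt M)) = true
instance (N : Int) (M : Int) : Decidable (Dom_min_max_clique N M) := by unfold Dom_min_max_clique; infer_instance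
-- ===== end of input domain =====

-- B replaces A's binary search by the O(sqrt N) divisor-block technique: it jumps over
-- blocks of r sharing the quotient N // r and solves each block by one ceiling division.

-- ===== PORT A =====
def e_for_complete (n : Int) : Int := (n * (n - 1)) >>> (1 : Nat)

def edges_at_most (r : Int) (n : Int) : Int :=
  let m := PySem.Int.floordiv n r
  let k := PySem.Int.mod n r
  let rk := r - k
  let res := e_for_complete k * (m + 1) * (m + 1)
  let res := res + e_for_complete rk * m * m
  let res := res + k * (m + 1) * rk * m
  res

def mmcLoop (N : Int) (M : Int) : Nat → Int → Int → Int
  | 0, _l, r => r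
  | fuel + 1, l, r =>
    if l < r then
      let m := l + ((r - l) >>> (1 : Nat))
      let n_edges := edges_at_most m N
      if n_edges = M then m
      else if n_edges > M then mmcLoop N M fuel l m
      else mmcLoop N M fuel (m + 1) r
    else r
-- the Nat fuel only totalises the while-loop: it starts at (N-2).toNat and each
-- iteration shrinks r - l by at least 1, so it never runs out (see pv_loopA)

def min_max_clique (N : Int) (M : Int) : Int := mmcLoop N M (N - 2).toNat 2 N

-- ===== PORT B =====
def mmcAltLoop (N : Int) (T : Int) : Nat → Int → Int
  | 0, _r => N
  | fuel + 1, r =>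
    if r ≤ N - 1 then
      let m := PySem.Int.floordiv N r
      let r2 := min (PySem.Int.floordiv N m) (N - 1)
      let cand := -(PySem.Int.floordiv (T - 2 * N * m) (m * (m + 1)))
      if cand ≤ r2 then (if cand ≤ r then r else cand)
      else mmcAltLoop N T fuel (r2 + 1)
    else N
-- the Nat fuel only totalises the while-loop: it starts at (N-2).toNat and each
-- iteration increases r by at least 1 while r stays ≤ N (see pv_loopB)

def min_max_clique_alt (N : Int) (M : Int) : Int :=
  mmcAltLoop N (N * (N - 1) - 2 * M) (N - 2).toNat 2

-- ===== PRECONDITION & SPEC =====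
def Spec_min_max_clique (N : Int) (M : Int) (out : Int) : Prop := out = min_max_clique_alt N M
instance (N : Int) (M : Int) (out : Int) : Decidable (Spec_min_max_clique N M out) := by unfold Spec_min_max_clique; infer_instance

-- ===== CLAIM (what is proved, stated in full; the proofs are below) =====
def Claim_equal_min_max_clique : Prop := ∀ (N : Int) (M : Int), Dom_min_max_clique N M → Spec_min_max_clique N M (min_max_clique N M)

-- ===== LEMMAS AND PROOFS =====

-- Python’s x >> 1 is floor division by 2
theorem pv_shiftRight_one (x : Int) : x >>> (1 : Nat) = x / 2 := by
  have := Int.shiftRight_eq_div_pow x 1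
  simpa using this


-- G r n = twice the number of within-part edges of the balanced r-partition of n vertices
def pvG (r : Int) (n : Int) : Int :=
  r * (PySem.Int.floordiv n r) * (PySem.Int.floordiv n r - 1)
    + 2 * (PySem.Int.mod n r) * (PySem.Int.floordiv n r)

-- S j r = sum_{i<j} (i // r)
def pvS (j : Nat) (r : Int) : Int :=
  match j with
  | 0 => 0
  | Nat.succ i => pvS i r + PySem.Int.floordiv (i : Int) r

theorem pv_fd_nonneg (i r : Int) (hi : 0 ≤ i) (hr : 0 < r) : 0 ≤ PySem.Int.floordiv i r := by
  rw [PySem.Int.le_floordiv_iff_mul_le hr]; omega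

theorem pv_fd_mul_le (i r : Int) (hr : 0 < r) : PySem.Int.floordiv i r * r ≤ i := by
  have h1 := PySem.Int.floordiv_mul_add_mod i r
  have h2 := PySem.Int.mod_nonneg i hr
  linarith

theorem pv_term_le (i r : Int) (hi : 0 ≤ i) (hr : 0 < r) :
    PySem.Int.floordiv i (r + 1) ≤ PySem.Int.floordiv i r := by
  have hq0 : 0 ≤ PySem.Int.floordiv i (r + 1) := pv_fd_nonneg i (r + 1) hi (by omega)
  have h1 : PySem.Int.floordiv i (r + 1) * (r + 1) ≤ i := pv_fd_mul_le i (r + 1) (by omega)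
  rw [PySem.Int.le_floordiv_iff_mul_le hr]
  nlinarith

theorem pv_S_le (j : Nat) (r : Int) (hr : 0 < r) : pvS j (r + 1) ≤ pvS j r := by
  induction j with
  | zero => simp [pvS]
  | succ i ih =>
      have := pv_term_le (i : Int) r (by positivity) hr
      simp only [pvS]; linarith

theorem pv_S_lt (j : Nat) (r : Int) (hr : 0 < r) (hj : r < (j : Int)) : pvS j (r + 1) < pvS j r := by
  induction j with
  | zero => simp at hj; omega
  | succ i ih =>
      rcases lt_or_ge r (i : Int) with h | h
      · have h1 := ih h
        have h2 := pv_term_le (i : Int) r (by positivity) hr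
        simp only [pvS]; linarith
      · have hri : r = (i : Int) := by push_cast at hj; omega
        have e1 : PySem.Int.floordiv (i : Int) (r + 1) = 0 := by
          rw [PySem.Int.floordiv_eq_iff_of_pos (by omega)]; omega
        have e2 : PySem.Int.floordiv (i : Int) r = 1 := by
          rw [PySem.Int.floordiv_eq_iff_of_pos hr]; omega
        have h3 := pv_S_le i r hr
        simp only [pvS, e1, e2]; linarith

theorem pv_G_eq_S (j : Nat) (r : Int) (hr : 0 < r) : pvG r (j : Int) = 2 * pvS j r := by
  induction j with
  | zero =>
      have e0 : PySem.Int.floordiv (0 : Int) r = 0 := by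
        rw [PySem.Int.floordiv_eq_iff_of_pos hr]; omega
      have em : PySem.Int.mod (0 : Int) r = 0 := by
        have := PySem.Int.floordiv_mul_add_mod (0 : Int) r
        rw [e0] at this; omega
      simp [pvG, pvS, e0, em]
  | succ i ih =>
      have hmk := PySem.Int.floordiv_mul_add_mod (i : Int) r
      have hk0 := PySem.Int.mod_nonneg (i : Int) hr
      have hkr := PySem.Int.mod_lt (i : Int) hr
      set m := PySem.Int.floordiv (i : Int) r with hm
      set k := PySem.Int.mod (i : Int) r with hk
      have ihx : r * m * (m - 1) + 2 * k * m = 2 * pvS i r := by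
        rw [← ih]; simp only [pvG, ← hm, ← hk]
      have hcast : ((i + 1 : Nat) : Int) = (i : Int) + 1 := by push_cast; ring
      by_cases hc : k + 1 < r
      · have efd : PySem.Int.floordiv ((i : Int) + 1) r = m := by
          rw [PySem.Int.floordiv_eq_iff_of_pos hr]
          constructor
          · linarith
          · have hx : (m + 1) * r = m * r + r := by ring
            linarith
        have emod : PySem.Int.mod ((i : Int) + 1) r = k + 1 := by
          have h2 := PySem.Int.floordiv_mul_add_mod ((i : Int) + 1) r
          rw [efd] at h2; linarith
        simp only [pvG, pvS, hcast, efd, emod]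
        linear_combination ihx
      · have hkeq : k = r - 1 := by omega
        have efd : PySem.Int.floordiv ((i : Int) + 1) r = m + 1 := by
          rw [PySem.Int.floordiv_eq_iff_of_pos hr]
          constructor
          · have hx : (m + 1) * r = m * r + r := by ring
            linarith
          · have hx : (m + 1 + 1) * r = m * r + r + r := by ring
            linarith
        have emod : PySem.Int.mod ((i : Int) + 1) r = 0 := by
          have h2 := PySem.Int.floordiv_mul_add_mod ((i : Int) + 1) r
          have hx : (m + 1) * r = m * r + r := by ring
          rw [efd] at h2; linarith
        rw [hkeq] at ihx
        simp only [pvG, pvS, hcast, efd, emod]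
        linear_combination ihx

theorem pv_G_step (r n : Int) (hr : 0 < r) (hrn : r + 1 ≤ n) : pvG (r + 1) n < pvG r n := by
  have hn0 : 0 ≤ n := by omega
  have hcast : ((n.toNat : Nat) : Int) = n := Int.toNat_of_nonneg hn0
  have h1 := pv_G_eq_S n.toNat r hr
  have h2 := pv_G_eq_S n.toNat (r + 1) (by omega)
  have h3 := pv_S_lt n.toNat r hr (by omega)
  rw [hcast] at h1 h2
  linarith

theorem pv_G_anti (a b n : Int) (ha : 0 < a) (hab : a < b) (hbn : b ≤ n) : pvG b n < pvG a n := by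
  obtain ⟨t, ht⟩ : ∃ t : Nat, b = a + 1 + (t : Int) := ⟨(b - a - 1).toNat, by omega⟩
  subst ht
  induction t with
  | zero => simpa using pv_G_step a n ha (by push_cast at hbn; omega)
  | succ s ih =>
      have hs : a + 1 + ((s : Nat) : Int) ≤ n := by omega
      have h1 : pvG (a + 1 + (s : Int) + 1) n < pvG (a + 1 + (s : Int)) n :=
        pv_G_step (a + 1 + (s : Int)) n (by positivity) (by push_cast at hbn; omega)
      have h2 := ih (by push_cast; omega) hs
      have hc : a + 1 + ((s + 1 : Nat) : Int) = a + 1 + (s : Int) + 1 := by push_cast; ring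
      rw [hc]
      linarith

theorem pv_two_mul_e (x : Int) : 2 * e_for_complete x = x * (x - 1) := by
  obtain ⟨c, hc⟩ := Int.even_mul_succ_self (x - 1)
  have hx : x * (x - 1) = 2 * c := by linear_combination hc
  simp only [e_for_complete, pv_shiftRight_one, hx]
  rw [Int.mul_ediv_cancel_left c (by norm_num)]

theorem pv_edges_eq (r n : Int) :
    2 * edges_at_most r n = n * (n - 1) - pvG r n := by
  have hmk := PySem.Int.floordiv_mul_add_mod n r
  set m := PySem.Int.floordiv n r with hm
  set k := PySem.Int.mod n r with hk
  have gen : ∀ mm kk : Int,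
      2 * (e_for_complete kk * (mm + 1) * (mm + 1) + e_for_complete (r - kk) * mm * mm
        + kk * (mm + 1) * (r - kk) * mm)
      = (mm * r + kk) * ((mm * r + kk) - 1) - (r * mm * (mm - 1) + 2 * kk * mm) := by
    intro mm kk
    have e1 := pv_two_mul_e kk
    have e2 := pv_two_mul_e (r - kk)
    linear_combination ((mm + 1) * (mm + 1)) * e1 + (mm * mm) * e2
  have := gen m k
  rw [hmk] at this
  simp only [edges_at_most, pvG, ← hm, ← hk]
  linarith

theorem pv_f_strict (a b n : Int) (ha : 0 < a) (hab : a < b) (hbn : b ≤ n) :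
    edges_at_most a n < edges_at_most b n := by
  have h := pv_G_anti a b n ha hab hbn
  have e1 := pv_edges_eq a n
  have e2 := pv_edges_eq b n
  linarith

-- the common characterisation of both loops' result
def pvP (N M res : Int) : Prop :=
  2 ≤ res ∧ res ≤ N ∧ (∀ x, 2 ≤ x → x < res → edges_at_most x N < M) ∧
    (res = N ∨ M ≤ edges_at_most res N)

theorem pvP_unique (N M a b : Int) (hA : pvP N M a) (hB : pvP N M b) : a = b := by
  obtain ⟨ha2, haN, halow, hahigh⟩ := hA
  obtain ⟨hb2, hbN, hblow, hbhigh⟩ := hB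
  rcases lt_trichotomy a b with h | h | h
  · exfalso
    have h1 := hblow a ha2 h
    rcases hahigh with h2 | h2
    · omega
    · linarith
  · exact h
  · exfalso
    have h1 := halow b hb2 h
    rcases hbhigh with h2 | h2
    · omega
    · linarith

theorem pv_loopA (N M : Int) : ∀ (fuel : Nat) (l r : Int), (r - l).toNat ≤ fuel →
    2 ≤ l → l ≤ r → r ≤ N → (∀ x, 2 ≤ x → x < l → edges_at_most x N < M) →
    (r = N ∨ M ≤ edges_at_most r N) → pvP N M (mmcLoop N M fuel l r) := by
  intro fuel
  induction fuel with
  | zero =>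
    intro l r hd h2 hlr hrN hlow hhigh
    have hlr' : l = r := by omega
    simp only [mmcLoop]
    exact ⟨by omega, hrN, fun x hx2 hxr => hlow x hx2 (by omega), hhigh⟩
  | succ fuel ih =>
    intro l r hd h2 hlr hrN hlow hhigh
    have hmid := pv_shiftRight_one (r - l)
    simp only [mmcLoop, gt_iff_lt]
    split_ifs with hlt he hgt
    · -- n_edges = M: result is the midpoint m
      set m := l + (r - l) >>> (1 : Nat) with hm
      rw [hmid] at hm
      have hlm : l ≤ m ∧ m < r := by omega
      refine ⟨by omega, by omega, ?_, Or.inr (le_of_eq he.symm)⟩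
      intro x hx2 hxm
      by_cases hxl : x < l
      · exact hlow x hx2 hxl
      · have := pv_f_strict x m N (by omega) (by omega) (by omega)
        rw [he] at this
        exact this
    · -- n_edges > M: recurse on (l, m)
      set m := l + (r - l) >>> (1 : Nat) with hm
      rw [hmid] at hm
      have hlm : l ≤ m ∧ m < r := by omega
      exact ih l m (by omega) h2 (by omega) (by omega) hlow (Or.inr (le_of_lt hgt))
    · -- n_edges < M: recurse on (m+1, r)
      set m := l + (r - l) >>> (1 : Nat) with hm
      rw [hmid] at hm
      have hlm : l ≤ m ∧ m < r := by omega
      have hfm : edges_at_most m N < M := by omega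
      refine ih (m + 1) r (by omega) (by omega) (by omega) hrN ?_ hhigh
      intro x hx2 hxm1
      by_cases hxl : x < l
      · exact hlow x hx2 hxl
      · rcases lt_or_ge x m with hxm | hxm
        · have := pv_f_strict x m N (by omega) hxm (by omega)
          linarith
        · have hxe : x = m := by omega
          rw [hxe]; exact hfm
    · -- l = r
      exact ⟨by omega, hrN, fun x hx2 hxr => hlow x hx2 (by omega), hhigh⟩

theorem pv_loopB (N M : Int) (hN : 2 ≤ N) : ∀ (fuel : Nat) (r : Int), (N - r).toNat ≤ fuel →
    2 ≤ r → r ≤ N → (∀ x, 2 ≤ x → x < r → edges_at_most x N < M) →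
    pvP N M (mmcAltLoop N (N * (N - 1) - 2 * M) fuel r) := by
  intro fuel
  induction fuel with
  | zero =>
    intro r hd h2 hrN hlow
    simp only [mmcAltLoop]
    exact ⟨hN, le_refl N, fun x hx2 hxN => hlow x hx2 (by omega), Or.inl rfl⟩
  | succ fuel ih =>
    intro r hd h2 hrN hlow
    by_cases hle : r ≤ N - 1
    · have hr0 : (0 : Int) < r := by omega
      have hm1 : 1 ≤ PySem.Int.floordiv N r :=
        (PySem.Int.le_floordiv_iff_mul_le hr0).mpr (by omega)
      set m := PySem.Int.floordiv N r with hmdef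
      have hm0 : (0 : Int) < m := by omega
      have hmrN : m * r ≤ N := pv_fd_mul_le N r hr0
      have hNlt : N < (m + 1) * r := by
        have hsum := PySem.Int.floordiv_mul_add_mod N r
        have hmod := PySem.Int.mod_lt N hr0
        have hx : (m + 1) * r = m * r + r := by ring
        rw [← hmdef] at hsum
        linarith
      simp only [mmcAltLoop, if_pos hle]
      rw [← hmdef]
      set r2 := min (PySem.Int.floordiv N m) (N - 1) with hr2def
      set cand := -PySem.Int.floordiv (N * (N - 1) - 2 * M - 2 * N * m) (m * (m + 1))
        with hcanddef
      have hr2 : r ≤ r2 := by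
        rw [hr2def]
        refine le_min ?_ (by omega)
        exact (PySem.Int.le_floordiv_iff_mul_le hm0).mpr (by linarith [mul_comm r m])
      have hr2b : r2 ≤ N - 1 := min_le_right _ _
      have hblock : ∀ x, r ≤ x → x ≤ r2 →
          PySem.Int.floordiv N x = m ∧ PySem.Int.mod N x = N - m * x := by
        intro x hx1 hx2
        have hx0 : (0 : Int) < x := by omega
        have hxm : x ≤ PySem.Int.floordiv N m := le_trans hx2 (by rw [hr2def]; exact min_le_left _ _)
        have h1 : x * m ≤ N := (PySem.Int.le_floordiv_iff_mul_le hm0).mp hxm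
        have h1' : m * x ≤ N := by linarith [mul_comm x m]
        have h2' : N < (m + 1) * x := by nlinarith
        have hfd : PySem.Int.floordiv N x = m :=
          (PySem.Int.floordiv_eq_iff_of_pos hx0).mpr ⟨h1', h2'⟩
        have hsum := PySem.Int.floordiv_mul_add_mod N x
        rw [hfd] at hsum
        exact ⟨hfd, by linarith⟩
      have hD : (0 : Int) < m * (m + 1) := by nlinarith
      have hcond : ∀ x, r ≤ x → x ≤ r2 → (M ≤ edges_at_most x N ↔ cand ≤ x) := by
        intro x hx1 hx2
        obtain ⟨hfd, hmod⟩ := hblock x hx1 hx2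
        have hG : pvG x N = 2 * N * m - x * (m * (m + 1)) := by
          simp only [pvG, hfd, hmod]; ring
        have hedge := pv_edges_eq x N
        have hiff := PySem.Int.le_floordiv_iff_mul_le
          (a := N * (N - 1) - 2 * M - 2 * N * m) (q := -x) hD
        have hprod : -x * (m * (m + 1)) = -(x * (m * (m + 1))) := by ring
        constructor
        · intro h
          have hineq : -x * (m * (m + 1)) ≤ N * (N - 1) - 2 * M - 2 * N * m := by
            rw [hprod]; linarith
          have := hiff.mpr hineq
          rw [hcanddef]; omega
        · intro h
          have h' : -x ≤ PySem.Int.floordiv (N * (N - 1) - 2 * M - 2 * N * m) (m * (m + 1)) := by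
            rw [hcanddef] at h; omega
          have hineq := hiff.mp h'
          rw [hprod] at hineq
          linarith
      split_ifs with hcr hcr2
      · -- cand ≤ r2 and cand ≤ r : result is r
        exact ⟨h2, by omega, hlow, Or.inr ((hcond r (le_refl r) hr2).mpr hcr2)⟩
      · -- cand ≤ r2 and r < cand : result is cand
        refine ⟨by omega, by omega, ?_, Or.inr ((hcond cand (by omega) hcr).mpr (le_refl cand))⟩
        intro x hx2 hxc
        by_cases hxr : x < r
        · exact hlow x hx2 hxr
        · have hiffx := hcond x (by omega) (by omega)
          have hnot : ¬ M ≤ edges_at_most x N := fun hh => by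
            have := hiffx.mp hh; omega
          linarith [lt_of_not_ge hnot]
      · -- cand > r2 : recurse past the block
        refine ih (r2 + 1) (by omega) (by omega) (by omega) ?_
        intro x hx2 hxr2
        by_cases hxr : x < r
        · exact hlow x hx2 hxr
        · have hiffx := hcond x (by omega) (by omega)
          have hnot : ¬ M ≤ edges_at_most x N := fun hh => by
            have := hiffx.mp hh; omega
          linarith [lt_of_not_ge hnot]
    · simp only [mmcAltLoop, if_neg hle]
      exact ⟨hN, le_refl N, fun x hx2 hxN => hlow x hx2 (by omega), Or.inl rfl⟩

theorem pv_equiv (N M : Int) : min_max_clique N M = min_max_clique_alt N M := by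
  by_cases hN : N ≤ 2
  · have hfuel : (N - 2).toNat = 0 := by omega
    unfold min_max_clique min_max_clique_alt
    rw [hfuel]
    simp only [mmcLoop, mmcAltLoop]
  · have hA := pv_loopA N M (N - 2).toNat 2 N (by omega) (le_refl 2) (by omega) (le_refl N)
      (fun x hx2 hx2' => absurd hx2' (by omega)) (Or.inl rfl)
    have hB := pv_loopB N M (by omega) (N - 2).toNat 2 (by omega) (le_refl 2) (by omega)
      (fun x hx2 hx2' => absurd hx2' (by omega))
    exact pvP_unique N M _ _ hA hB

-- ===== VERDICT (by name: the statement is the Claim_ definition above) =====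
theorem min_max_clique_spec : Claim_equal_min_max_clique := by
  intro N M _
  unfold Spec_min_max_clique
  exact pv_equiv N M
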